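-- pv_equiv track=rewrite | github.com/nharrer/TomsDataOnion | decode.py | bytearray_to_wordlist
-- ===== SOURCE A (Python) =====
-- def bytearray_to_wordlist(bytes, bytes_per_word=1):
--     ret = []
--     word = 0
--     cnt = 0
--     for b in bytes:
--         word = word << 8
--         word = word | b
--         cnt = cnt + 1
--         if cnt == bytes_per_word:
--             ret.append(word)
--             cnt = 0
--             word = 0
--     # pad if there is an unfinished last word
--     if cnt > 0:
--         word = word << 8 * (bytes_per_word - cnt)
--         ret.append(word)
--
--     return ret
-- ===== SOURCE B (Python) =====
-- def bytearray_to_wordlist(bytes, bytes_per_word=1):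
--     # chunk-level loop: slice the input into words, pad the last chunk on the right
--     if not bytes:
--         return []
--     words = []
--     for i in range(0, len(bytes), bytes_per_word):
--         chunk = bytes[i:i + bytes_per_word]
--         word = 0
--         for b in chunk:
--             word = (word << 8) | b
--         words.append(word << 8 * (bytes_per_word - len(chunk)))
--     return words
-- ===== Notes on version B (the rewrite author's own statement) =====
-- stated objective: idiomatic
-- what changed: Replaces the per-byte shift-or accumulator with its running counter and end-of-loop padding patch by a chunk-level loop that slices the input into words and right-pads only the last slice.
import Mathlib
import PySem

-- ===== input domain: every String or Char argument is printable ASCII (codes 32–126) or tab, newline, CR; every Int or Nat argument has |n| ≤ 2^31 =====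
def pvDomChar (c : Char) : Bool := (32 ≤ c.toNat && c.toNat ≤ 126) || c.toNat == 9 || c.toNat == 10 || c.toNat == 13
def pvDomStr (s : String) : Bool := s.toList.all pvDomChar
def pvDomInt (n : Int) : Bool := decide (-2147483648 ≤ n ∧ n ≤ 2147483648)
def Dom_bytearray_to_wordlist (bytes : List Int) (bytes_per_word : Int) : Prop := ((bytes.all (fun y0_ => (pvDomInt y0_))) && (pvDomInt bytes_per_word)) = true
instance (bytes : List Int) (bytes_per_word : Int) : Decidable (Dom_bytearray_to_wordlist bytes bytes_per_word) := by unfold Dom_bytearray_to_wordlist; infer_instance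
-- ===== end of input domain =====

-- B replaces A's per-byte shift-or accumulator + counter by a chunk-slicing loop (idiomatic, same cost).


-- ===== PORT A =====
-- loop body of A: state (ret, word, cnt)
def pvStepA (bytes_per_word : Int) (s : List Int × Int × Int) (b : Int) : List Int × Int × Int :=
  let ret := s.1
  let word := s.2.1
  let cnt := s.2.2
  let word := word <<< (8 : Nat)
  let word := PySem.Int.bor word b
  let cnt := cnt + 1
  if cnt = bytes_per_word then (ret ++ [word], 0, 0) else (ret, word, cnt)

def bytearray_to_wordlist (bytes : List Int) (bytes_per_word : Int) : List Int :=
  let s := bytes.foldl (pvStepA bytes_per_word) ([], 0, 0)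
  -- pad if there is an unfinished last word; Python raises on a negative shift, excluded by Pre_
  if s.2.2 > 0 then s.1 ++ [s.2.1 <<< (8 * (bytes_per_word - s.2.2)).toNat] else s.1

-- ===== PORT B =====
-- inner loop of B: word = 0; for b in chunk: word = (word << 8) | b
def pvWordOf (chunk : List Int) : Int :=
  chunk.foldl (fun w b => PySem.Int.bor (w <<< (8 : Nat)) b) 0

def bytearray_to_wordlist_alt (bytes : List Int) (bytes_per_word : Int) : List Int :=
  if bytes = [] then []
  else
    (PySem.List.pyRange 0 (bytes.length : Int) bytes_per_word).map (fun i =>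
      let chunk := PySem.List.slice bytes (some i) (some (i + bytes_per_word))
      pvWordOf chunk <<< (8 * (bytes_per_word - (chunk.length : Int))).toNat)

-- ===== PRECONDITION & SPEC =====
-- Pre_ excludes nonempty input with bytes_per_word ≤ 0: there A raises ValueError (negative shift at the padding step).
def Pre_bytearray_to_wordlist (bytes : List Int) (bytes_per_word : Int) : Prop :=
  1 ≤ bytes_per_word ∨ bytes = []
instance (bytes : List Int) (bytes_per_word : Int) : Decidable (Pre_bytearray_to_wordlist bytes bytes_per_word) := by unfold Pre_bytearray_to_wordlist; infer_instance

def pvWitness_bytearray_to_wordlist : List Int × Int := ([1, 2, 3], 2)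

def Spec_bytearray_to_wordlist (bytes : List Int) (bytes_per_word : Int) (out : List Int) : Prop := out = bytearray_to_wordlist_alt bytes bytes_per_word
instance (bytes : List Int) (bytes_per_word : Int) (out : List Int) : Decidable (Spec_bytearray_to_wordlist bytes bytes_per_word out) := by unfold Spec_bytearray_to_wordlist; infer_instance

-- ===== CLAIM (what is proved, stated in full; the proofs are below) =====
def Claim_equal_bytearray_to_wordlist : Prop := ∀ (bytes : List Int) (bytes_per_word : Int), Dom_bytearray_to_wordlist bytes bytes_per_word → Pre_bytearray_to_wordlist bytes bytes_per_word → Spec_bytearray_to_wordlist bytes bytes_per_word (bytearray_to_wordlist bytes bytes_per_word)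

-- ===== LEMMAS AND PROOFS =====

-- fuel-indexed reference chunking; used with fuel ≥ l.length and 0 < n
def pvChunkF : Nat → Nat → List Int → List Int
  | 0, _, _ => []
  | fuel + 1, n, l =>
    if l = [] then []
    else pvWordOf (l.take n) <<< (8 * (n - min n l.length)) :: pvChunkF fuel n (l.drop n)

theorem pvChunkF_nil (fuel n : Nat) : pvChunkF fuel n [] = [] := by
  cases fuel <;> simp [pvChunkF]

-- run A's loop over a chunk that cannot overrun the word boundary
theorem pvFoldRun (n : Nat) (chunk : List Int) :
    ∀ (ret : List Int) (w : Int) (c : Nat), c + chunk.length ≤ n →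
    chunk.foldl (pvStepA (n : Int)) (ret, w, (c : Int))
      = if c + chunk.length = n ∧ chunk ≠ [] then
          (ret ++ [chunk.foldl (fun w b => PySem.Int.bor (w <<< (8 : Nat)) b) w], 0, 0)
        else
          (ret, chunk.foldl (fun w b => PySem.Int.bor (w <<< (8 : Nat)) b) w, ((c + chunk.length : Nat) : Int)) := by
  induction chunk with
  | nil => intro ret w c h; simp
  | cons b rest ih =>
    intro ret w c h
    simp only [List.foldl_cons]
    have hstep : pvStepA (n : Int) (ret, w, (c : Int)) b
        = if ((c : Int) + 1 = (n : Int)) then (ret ++ [PySem.Int.bor (w <<< (8 : Nat)) b], 0, 0)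
          else (ret, PySem.Int.bor (w <<< (8 : Nat)) b, (c : Int) + 1) := by
      simp [pvStepA]
    rw [hstep]
    simp only [List.length_cons] at h
    by_cases hc : c + 1 = n
    · have hrest : rest = [] := by
        have hl : rest.length = 0 := by omega
        exact List.eq_nil_of_length_eq_zero hl
      subst hrest
      rw [if_pos (by exact_mod_cast hc : (c : Int) + 1 = (n : Int))]
      simp only [List.foldl_nil]
      rw [if_pos ⟨by simp only [List.length_cons, List.length_nil]; omega, by simp⟩]
    · rw [if_neg (by exact_mod_cast hc : ¬ ((c : Int) + 1 = (n : Int)))]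
      have hcast : (c : Int) + 1 = ((c + 1 : Nat) : Int) := by push_cast; ring
      rw [hcast, ih ret (PySem.Int.bor (w <<< (8 : Nat)) b) (c + 1) (by omega)]
      by_cases hr : c + 1 + rest.length = n ∧ rest ≠ []
      · rw [if_pos hr, if_pos ⟨by simp only [List.length_cons]; omega, by simp⟩]
      · rw [if_neg hr]
        have hnil : ¬ (c + (b :: rest).length = n ∧ (b :: rest) ≠ []) := by
          intro ⟨h1, _⟩
          simp only [List.length_cons] at h1
          rcases Decidable.em (rest = []) with he | he
          · subst he; simp at h1; omega
          · exact hr ⟨by omega, he⟩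
        rw [if_neg hnil]
        simp
        omega

-- A's loop + final padding equals the reference chunking
theorem pvA_eq_chunk (n : Nat) (hn : 0 < n) :
    ∀ (fuel : Nat) (l ret : List Int), l.length ≤ fuel →
    (let s := l.foldl (pvStepA (n : Int)) (ret, 0, 0)
     if s.2.2 > 0 then s.1 ++ [s.2.1 <<< (8 * ((n : Int) - s.2.2)).toNat] else s.1)
      = ret ++ pvChunkF fuel n l := by
  intro fuel
  induction fuel with
  | zero =>
    intro l ret h
    have : l = [] := List.eq_nil_of_length_eq_zero (by omega)
    subst this
    simp [pvChunkF]
  | succ fuel ih =>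
    intro l ret h
    by_cases hl : l = []
    · subst hl; simp [pvChunkF]
    · by_cases hlen : l.length < n
      · -- the whole of l is a partial final chunk
        have hrun := pvFoldRun n l ret 0 0 (by omega)
        rw [if_neg (by rintro ⟨h1, -⟩; omega : ¬ (0 + l.length = n ∧ l ≠ []))] at hrun
        simp only [Nat.cast_zero, Nat.zero_add] at hrun
        simp only [hrun]
        have hlp : 0 < l.length := List.length_pos_iff.mpr hl
        rw [if_pos (by push_cast; omega : ((l.length : Nat) : Int) > 0)]
        have htoNat : (8 * ((n : Int) - ((l.length : Nat) : Int))).toNat = 8 * (n - min n l.length) := by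
          push_cast; omega
        rw [htoNat]
        simp only [pvChunkF, if_neg hl]
        rw [List.take_of_length_le (by omega), List.drop_of_length_le (by omega), pvChunkF_nil]
        simp [pvWordOf]
      · -- a full chunk followed by the rest
        push_neg at hlen
        have hsplit : l = l.take n ++ l.drop n := (List.take_append_drop n l).symm
        conv_lhs => rw [hsplit]
        rw [List.foldl_append]
        have htk : (l.take n).length = n := List.length_take_of_le hlen
        have hrun := pvFoldRun n (l.take n) ret 0 0 (by omega)
        have hne : l.take n ≠ [] := by
          intro hc
          have h0 : (l.take n).length = 0 := by rw [hc]; rfl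
          omega
        rw [if_pos ⟨by omega, hne⟩] at hrun
        simp only [Nat.cast_zero] at hrun
        rw [hrun]
        have hrest := ih (l.drop n) (ret ++ [(l.take n).foldl (fun w b => PySem.Int.bor (w <<< (8 : Nat)) b) 0]) (by rw [List.length_drop]; omega)
        simp only at hrest
        rw [hrest]
        simp only [pvChunkF, if_neg hl]
        rw [min_eq_left (by omega : n ≤ l.length)]
        simp [pvWordOf]

-- one step of pyRange with a positive step
theorem pvPyRange_cons (a b s : Int) (hs : 0 < s) (h : a < b) :
    PySem.List.pyRange a b s = a :: PySem.List.pyRange (a + s) b s := by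
  rw [PySem.List.pyRange_of_pos a b hs, PySem.List.pyRange_of_pos (a + s) b hs]
  rw [if_pos h]
  set c1 : Int := (b - a + s - 1) / s with hc1
  have hge1 : 1 ≤ c1 := by
    rw [hc1, Int.le_ediv_iff_mul_le hs]; omega
  have hc2eq : (b - (a + s) + s - 1) / s = c1 - 1 := by
    have he : b - (a + s) + s - 1 = (b - a + s - 1) + (-1) * s := by ring
    rw [he, Int.add_mul_ediv_right _ _ (by omega : s ≠ 0), hc1]
    ring
  have hnc : c1.toNat = (c1 - 1).toNat + 1 := by omega
  have htail : ∀ m : Nat, List.map (fun k : Nat => a + s * (k : Int)) (List.range (m + 1))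
      = a :: List.map (fun k : Nat => (a + s) + s * (k : Int)) (List.range m) := by
    intro m
    rw [List.range_succ_eq_map, List.map_cons, List.map_map]
    simp only [Nat.cast_zero, mul_zero, add_zero]
    congr 1
    refine List.map_congr_left ?_
    intro k _
    simp only [Function.comp_apply, Nat.succ_eq_add_one]
    push_cast; ring
  by_cases h2 : a + s < b
  · rw [if_pos h2, hc2eq, hnc, htail]
  · rw [if_neg h2]
    have hlt2 : c1 < 2 := by
      rw [hc1, Int.ediv_lt_iff_lt_mul hs]; omega
    have hc1' : c1 = 1 := by omega
    rw [hc1']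
    simp

-- B equals the reference chunking
theorem pvB_eq_chunk (n : Nat) (hn : 0 < n) :
    ∀ (fuel : Nat) (xs : List Int) (j : Nat), (xs.drop j).length ≤ fuel →
    (PySem.List.pyRange (j : Int) (xs.length : Int) (n : Int)).map (fun i =>
        pvWordOf (PySem.List.slice xs (some i) (some (i + (n : Int)))) <<<
          (8 * ((n : Int) - ((PySem.List.slice xs (some i) (some (i + (n : Int)))).length : Int))).toNat)
      = pvChunkF fuel n (xs.drop j) := by
  intro fuel
  induction fuel with
  | zero =>
    intro xs j h
    have hnil : xs.drop j = [] := List.eq_nil_of_length_eq_zero (by omega)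
    have hle : xs.length ≤ j := List.drop_eq_nil_iff.mp hnil
    rw [PySem.List.pyRange_of_pos _ _ (by exact_mod_cast hn)]
    rw [if_neg (by push_cast; omega)]
    simp [hnil, pvChunkF_nil]
  | succ fuel ih =>
    intro xs j h
    by_cases hj : xs.length ≤ j
    · have hnil : xs.drop j = [] := List.drop_of_length_le hj
      rw [PySem.List.pyRange_of_pos _ _ (by exact_mod_cast hn)]
      rw [if_neg (by push_cast; omega)]
      simp [hnil, pvChunkF_nil]
    · push_neg at hj
      rw [pvPyRange_cons _ _ _ (by exact_mod_cast hn) (by exact_mod_cast hj)]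
      rw [List.map_cons]
      have hchunk : PySem.List.slice xs (some (j : Int)) (some (((j + n : Nat)) : Int))
          = (xs.drop j).take n := by
        rw [(by push_cast; ring : (((j + n : Nat)) : Int) = (j : Int) + (n : Int))]
        exact PySem.List.slice_natCast_add xs j n
      have hlen : ((xs.drop j).take n).length = min n (xs.drop j).length := by
        simp
      have hcast : ((j : Int) + (n : Int)) = (((j + n : Nat)) : Int) := by push_cast; ring
      have hdd : xs.drop (j + n) = (xs.drop j).drop n := by
        rw [List.drop_drop]
      have hlh : (xs.drop (j+n)).length ≤ fuel := by
        rw [List.length_drop]; rw [List.length_drop] at h; omega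
      have htailIH := ih xs (j + n) hlh
      rw [hcast, htailIH, hdd]
      have hln : xs.drop j ≠ [] := by
        intro hc
        rw [List.drop_eq_nil_iff] at hc
        omega
      conv_rhs => rw [pvChunkF]
      rw [if_neg hln]
      congr 1
      rw [hchunk, hlen]
      congr 1
      have hm : min n (xs.drop j).length ≤ n := min_le_left _ _
      push_cast
      omega

-- ===== VERDICT (by name: the statement is the Claim_ definition above) =====
theorem bytearray_to_wordlist_spec : Claim_equal_bytearray_to_wordlist := by
  intro bytes bpw _ hpre
  unfold Spec_bytearray_to_wordlist
  rcases Decidable.em (bytes = []) with hb | hb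
  · subst hb
    simp [bytearray_to_wordlist, bytearray_to_wordlist_alt]
  · rcases hpre with h1 | h1
    · set n : Nat := bpw.toNat with hn
      have hbpw : bpw = (n : Int) := by omega
      have hnpos : 0 < n := by omega
      rw [bytearray_to_wordlist, bytearray_to_wordlist_alt, if_neg hb, hbpw]
      have hA := pvA_eq_chunk n hnpos bytes.length bytes [] (le_refl _)
      have hB := pvB_eq_chunk n hnpos bytes.length bytes 0 (by simp)
      simp only [List.drop_zero] at hB
      simp only [Nat.cast_zero] at hB
      rw [hA]
      simp only [List.nil_append]
      rw [← hB]
    · exact absurd h1 hb
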